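-- pv_equiv track=rewrite | github.com/Dafydd8/TDI | Practica/Guia 6/ej_3.py | escribir_hasta_primer_numeral
-- ===== SOURCE A (Python) =====
-- def escribir_hasta_primer_numeral(s:str) -> str:
--     res:str = ''
--     i:int = 0
--     ver:bool = True
--     while i < len(s) and ver:
--         if s[i] != '#':
--             res = res + s[i]
--         else:
--             ver = False
--         i = i + 1
--     return res
-- ===== SOURCE B (Python) =====
-- def escribir_hasta_primer_numeral(s: str) -> str:
--     return s.partition('#')[0]
-- ===== Notes on version B (the rewrite author's own statement) =====
-- stated objective: idiomatic
-- what changed: The explicit index/flag while-loop accumulating characters one by one is replaced by a single closed-form str.partition call that returns the part before the first separator.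
import Mathlib
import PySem

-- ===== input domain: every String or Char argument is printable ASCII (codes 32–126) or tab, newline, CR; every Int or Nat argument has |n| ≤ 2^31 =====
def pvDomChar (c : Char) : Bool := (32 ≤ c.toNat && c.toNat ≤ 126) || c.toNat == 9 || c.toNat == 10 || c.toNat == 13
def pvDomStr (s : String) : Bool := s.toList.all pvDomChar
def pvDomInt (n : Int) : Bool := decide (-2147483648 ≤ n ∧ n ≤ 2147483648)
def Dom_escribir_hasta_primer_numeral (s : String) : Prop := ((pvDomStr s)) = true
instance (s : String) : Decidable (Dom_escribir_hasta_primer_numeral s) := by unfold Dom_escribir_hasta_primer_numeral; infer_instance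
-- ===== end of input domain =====

-- ===== PORT A =====
-- B replaces A's index/flag while-loop with a closed-form partition call (idiomatic, same result).
-- literal transliteration of A's while-loop: res accumulator, ver flag folded into the early stop
def pvLoopA : List Char → List Char → List Char
  | [], res => res
  | c :: rest, res => if c ≠ '#' then pvLoopA rest (res ++ [c]) else res

def escribir_hasta_primer_numeral (s : String) : String := String.ofList (pvLoopA s.toList [])

-- ===== PORT B =====
-- s.partition('#')[0] = longest prefix of s with no '#'
def escribir_hasta_primer_numeral_alt (s : String) : String :=
  String.ofList (s.toList.takeWhile (fun c => c != '#'))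

-- ===== PRECONDITION & SPEC =====
def Spec_escribir_hasta_primer_numeral (s : String) (out : String) : Prop := out = escribir_hasta_primer_numeral_alt s
instance (s : String) (out : String) : Decidable (Spec_escribir_hasta_primer_numeral s out) := by unfold Spec_escribir_hasta_primer_numeral; infer_instance

-- ===== CLAIM (what is proved, stated in full; the proofs are below) =====
def Claim_equal_escribir_hasta_primer_numeral : Prop := ∀ (s : String), Dom_escribir_hasta_primer_numeral s → Spec_escribir_hasta_primer_numeral s (escribir_hasta_primer_numeral s)

-- ===== LEMMAS AND PROOFS =====

theorem pvLoopA_eq (cs res : List Char) :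
    pvLoopA cs res = res ++ cs.takeWhile (fun c => c != '#') := by
  induction cs generalizing res with
  | nil => simp [pvLoopA]
  | cons c rest ih =>
    by_cases h : c = '#'
    · subst h; simp [pvLoopA]
    · simp [pvLoopA, h, ih]

-- ===== VERDICT (by name: the statement is the Claim_ definition above) =====
theorem escribir_hasta_primer_numeral_spec : Claim_equal_escribir_hasta_primer_numeral := by
  intro s _
  unfold Spec_escribir_hasta_primer_numeral escribir_hasta_primer_numeral escribir_hasta_primer_numeral_alt
  rw [pvLoopA_eq]
  simp
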